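-- pv_equiv track=rewrite | github.com/sebagonz106/Chain-Of-Table | utils/table_ops.py | f_add_column
-- ===== SOURCE A (Python) =====
-- import copy
-- from typing import List, Dict, Any, Union
--
-- def f_add_column(table: List[Dict], column_name: str, values: List[Any] = None,
--                  default_value: Any = "") -> List[Dict]:
--     """
--     Adds a new column to the table.
--
--     Args:
--         table: List of dictionaries representing the table
--         column_name: Name of the new column
--         values: List of values for the new column (optional)
--         default_value: Default value if no values are provided
--
--     Returns:
--         New table with the added column
--     """
--     if not table:
--         return table
--
--     new_table = copy.deepcopy(table)
--
--     if values is None: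
--         # If no values provided, use default value
--         for row in new_table:
--             row[column_name] = default_value
--     else:
--         # Assign provided values
--         for i, row in enumerate(new_table):
--             if i < len(values):
--                 row[column_name] = values[i]
--             else:
--                 row[column_name] = default_value
--
--     return new_table
-- ===== SOURCE B (Python) =====
-- import copy
--
-- def f_add_column(table, column_name, values=None, default_value=""):
--     # Recursive decomposition: consume rows and the remaining values together,
--     # building each output row fresh (per-row deepcopy + dict rebuild) back-to-front.
--     if not table:
--         return table
--
--     def go(rows, vs):
--         if not rows:
--             return []
--         v = vs[0] if vs else default_value
--         new_row = {**copy.deepcopy(rows[0]), column_name: v}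
--         return [new_row] + go(rows[1:], vs[1:])
--
--     return go(table, [] if values is None else list(values))
-- ===== Notes on version B (the rewrite author's own statement) =====
-- stated objective: alternative
-- what changed: B is recursive: it co-recurses on the row list and the remaining-values list, building each output row fresh as a per-row deepcopy merged with the new key, instead of A's whole-table deepcopy followed by two branch-specific in-place mutation loops indexed with enumerate.
import Mathlib
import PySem

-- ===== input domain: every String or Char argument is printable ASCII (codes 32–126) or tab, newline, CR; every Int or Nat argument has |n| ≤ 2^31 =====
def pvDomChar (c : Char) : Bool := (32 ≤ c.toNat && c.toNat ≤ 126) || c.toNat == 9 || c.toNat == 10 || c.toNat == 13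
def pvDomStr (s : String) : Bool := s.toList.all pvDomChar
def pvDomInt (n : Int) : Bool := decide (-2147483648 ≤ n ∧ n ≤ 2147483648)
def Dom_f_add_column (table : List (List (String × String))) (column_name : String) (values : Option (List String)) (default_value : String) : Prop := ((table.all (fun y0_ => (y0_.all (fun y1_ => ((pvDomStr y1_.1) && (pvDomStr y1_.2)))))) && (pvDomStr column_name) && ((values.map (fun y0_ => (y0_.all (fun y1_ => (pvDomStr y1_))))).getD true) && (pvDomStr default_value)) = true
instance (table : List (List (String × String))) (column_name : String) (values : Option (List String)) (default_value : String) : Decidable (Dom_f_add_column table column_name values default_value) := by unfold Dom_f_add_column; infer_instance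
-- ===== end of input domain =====

-- B is a recursion consuming the row list and the remaining values together, building each
-- output row fresh (per-row copy merged with the new key), instead of A's whole-table
-- deepcopy followed by two branch-specific in-place mutation loops (alternative decomposition).
-- Equivalence is about the RETURN value; both Pythons leave the caller's argument unchanged.

-- Python dict assignment / {**d, k: v}: overwrite in place, new key appends
def pvIns (row : List (String × String)) (k v : String) : List (String × String) :=
  (PySem.Dict.insert (PySem.Dict.mk row) k v).items

-- ===== PORT A =====
-- the 'for i, row in enumerate(new_table)' loop of A's values-branch
def pvLoopA (cn d : String) (vs : List String) : Nat → List (List (String × String)) → List (List (String × String))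
  | _, [] => []
  | i, row :: rest =>
    (if (i : Int) < (vs.length : Int) then pvIns row cn (PySem.List.pyGetD vs (i : Int) d)
     else pvIns row cn d) :: pvLoopA cn d vs (i + 1) rest

def f_add_column (table : List (List (String × String))) (column_name : String) (values : Option (List String)) (default_value : String) : List (List (String × String)) :=
  if table = [] then table
  else
    match values with
    | none => table.map (fun row => pvIns row column_name default_value)
    | some vs => pvLoopA column_name default_value vs 0 table

-- ===== PORT B =====
-- B's inner recursive 'go(rows, vs)': head row gets vs[0] (or the default when vs is empty),
-- recurse on rows[1:] and vs[1:]
def pvGoB (cn d : String) : List (List (String × String)) → List String → List (List (String × String))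
  | [], _ => []
  | row :: rest, [] => [pvIns row cn d] ++ pvGoB cn d rest []
  | row :: rest, v :: vt => [pvIns row cn v] ++ pvGoB cn d rest vt

def f_add_column_alt (table : List (List (String × String))) (column_name : String) (values : Option (List String)) (default_value : String) : List (List (String × String)) :=
  if table = [] then table
  else pvGoB column_name default_value table (match values with | none => [] | some vs => vs)

-- ===== PRECONDITION & SPEC =====
def Spec_f_add_column (table : List (List (String × String))) (column_name : String) (values : Option (List String)) (default_value : String) (out : List (List (String × String))) : Prop := out = f_add_column_alt table column_name values default_value
instance (table : List (List (String × String))) (column_name : String) (values : Option (List String)) (default_value : String) (out : List (List (String × String))) : Decidable (Spec_f_add_column table column_name values default_value out) := by unfold Spec_f_add_column; infer_instance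

-- ===== CLAIM (what is proved, stated in full; the proofs are below) =====
def Claim_equal_f_add_column : Prop := ∀ (table : List (List (String × String))) (column_name : String) (values : Option (List String)) (default_value : String), Dom_f_add_column table column_name values default_value → Spec_f_add_column table column_name values default_value (f_add_column table column_name values default_value)

-- ===== LEMMAS AND PROOFS =====

lemma pv_none_case (cn d : String) (table : List (List (String × String))) :
    table.map (fun row => pvIns row cn d) = pvGoB cn d table [] := by
  induction table with
  | nil => rfl
  | cons row rest ih => simp [pvGoB, ih]

lemma pv_some_case (cn d : String) (vs : List String) :
    ∀ (rows : List (List (String × String))) (i : Nat),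
      pvLoopA cn d vs i rows = pvGoB cn d rows (vs.drop i) := by
  intro rows
  induction rows with
  | nil => intro i; rfl
  | cons row rest ih =>
    intro i
    by_cases h : i < vs.length
    · have hd : vs.drop i = vs[i] :: vs.drop (i + 1) := List.drop_eq_getElem_cons h
      have hg : PySem.List.pyGetD vs (i : Int) d = vs[i] := by
        simp [PySem.List.pyGetD, PySem.List.pyGet?, PySem.List.pyIdx?, h]
      have h' : (i : Int) < (vs.length : Int) := by exact_mod_cast h
      simp only [pvLoopA, hd, hg, if_pos h', pvGoB, ih (i + 1)]
      rfl
    · have hd : vs.drop i = [] := List.drop_eq_nil_of_le (by omega)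
      have hd' : vs.drop (i + 1) = [] := List.drop_eq_nil_of_le (by omega)
      have h' : ¬ ((i : Int) < (vs.length : Int)) := by exact_mod_cast h
      simp only [pvLoopA, hd, if_neg h', pvGoB, ih (i + 1), hd']
      rfl

-- ===== VERDICT (by name: the statement is the Claim_ definition above) =====
theorem f_add_column_spec : Claim_equal_f_add_column := by
  intro table cn values d _
  unfold Spec_f_add_column f_add_column f_add_column_alt
  by_cases ht : table = []
  · simp [ht]
  · simp only [ht, if_false]
    cases values with
    | none => exact pv_none_case cn d table
    | some vs => simpa using pv_some_case cn d vs table 0
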